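-- pv_equiv track=rewrite | github.com/uncw-library/digitalmeasures-scripts | making_turtle/xml_to_turtle.py | is_only_do_not_use
-- ===== SOURCE A (Python) =====
-- def is_only_do_not_use(parsed_user):
--     # some users have a department name with the text "DO NOT USE"
--     # exclude the user if all their departments names are such
--     listed_depts = [dept for dept in parsed_user.get("current_depts") if dept]
--     minus_do_not_use_depts = [
--         dept
--         for dept in parsed_user.get("current_depts")
--         if dept and "do not use" not in dept.lower()
--     ]
--     if len(listed_depts) != len(minus_do_not_use_depts):
--         return True
--     return False
-- ===== SOURCE B (Python) =====
-- def is_only_do_not_use(parsed_user):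
--     # True iff some non-empty current department name contains "do not use"
--     return any(
--         "do not use" in dept.lower()
--         for dept in parsed_user.get("current_depts")
--         if dept
--     )
-- ===== Notes on version B (the rewrite author's own statement) =====
-- stated objective: simpler
-- what changed: Replaced building two filtered lists and comparing their lengths with a single short-circuiting any() over the departments, returning True as soon as one non-empty name contains 'do not use'.
import Mathlib
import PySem

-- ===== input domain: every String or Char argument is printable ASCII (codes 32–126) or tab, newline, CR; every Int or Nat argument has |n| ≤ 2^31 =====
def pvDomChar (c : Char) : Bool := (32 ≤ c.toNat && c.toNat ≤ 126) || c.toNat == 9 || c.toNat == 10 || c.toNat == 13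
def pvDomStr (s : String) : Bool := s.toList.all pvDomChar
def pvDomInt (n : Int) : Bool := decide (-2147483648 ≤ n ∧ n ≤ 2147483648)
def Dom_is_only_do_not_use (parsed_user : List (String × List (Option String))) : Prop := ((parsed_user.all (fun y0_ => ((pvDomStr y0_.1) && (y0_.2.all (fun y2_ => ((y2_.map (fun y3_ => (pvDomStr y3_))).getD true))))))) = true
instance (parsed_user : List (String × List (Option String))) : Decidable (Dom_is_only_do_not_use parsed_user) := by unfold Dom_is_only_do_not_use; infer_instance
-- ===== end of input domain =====

-- B replaces A's two filtered lists + length comparison by a single short-circuiting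
-- existence check (any); objective: simpler.

-- ===== PORT A =====
-- truthiness of a department entry: None and "" are falsy
def pvTruthy (d : Option String) : Bool :=
  match d with
  | none => false
  | some s => decide (s ≠ "")

def is_only_do_not_use (parsed_user : List (String × List (Option String))) : Bool :=
  let depts := (PySem.Dict.get? (PySem.Dict.mk parsed_user) "current_depts").getD []
  let listed_depts := depts.filter pvTruthy
  let minus_do_not_use_depts := depts.filter (fun d =>
    match d with
    | none => false
    | some s => decide (s ≠ "") && !(PySem.Str.isIn "do not use" (PySem.Str.lower s)))
  if listed_depts.length ≠ minus_do_not_use_depts.length then true else false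

-- ===== PORT B =====
def is_only_do_not_use_alt (parsed_user : List (String × List (Option String))) : Bool :=
  ((PySem.Dict.get? (PySem.Dict.mk parsed_user) "current_depts").getD []).any (fun d =>
    match d with
    | none => false
    | some s => decide (s ≠ "") && PySem.Str.isIn "do not use" (PySem.Str.lower s))

-- ===== PRECONDITION & SPEC =====
-- Pre_ excludes only inputs where parsed_user.get("current_depts") is None, on which
-- both A and B raise TypeError iterating over None.
def Pre_is_only_do_not_use (parsed_user : List (String × List (Option String))) : Prop :=
  (PySem.Dict.mk parsed_user).contains "current_depts" = true
instance (parsed_user : List (String × List (Option String))) : Decidable (Pre_is_only_do_not_use parsed_user) := by unfold Pre_is_only_do_not_use; infer_instance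

def pvWitness_is_only_do_not_use : (List (String × List (Option String))) :=
  [("current_depts", [some "Mathematics", none, some ""])]

def Spec_is_only_do_not_use (parsed_user : List (String × List (Option String))) (out : Bool) : Prop := out = is_only_do_not_use_alt parsed_user
instance (parsed_user : List (String × List (Option String))) (out : Bool) : Decidable (Spec_is_only_do_not_use parsed_user out) := by unfold Spec_is_only_do_not_use; infer_instance

-- ===== CLAIM (what is proved, stated in full; the proofs are below) =====
def Claim_equal_is_only_do_not_use : Prop := ∀ (parsed_user : List (String × List (Option String))), Dom_is_only_do_not_use parsed_user → Pre_is_only_do_not_use parsed_user → Spec_is_only_do_not_use parsed_user (is_only_do_not_use parsed_user)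

-- ===== LEMMAS AND PROOFS =====

-- core counting lemma: the two filtered lists have different lengths iff some element
-- passes p and satisfies r
theorem pv_filter_len_ne_iff_any {α : Type} (p r : α → Bool) (l : List α) :
    (decide ((l.filter p).length ≠ (l.filter (fun d => p d && !r d)).length))
      = l.any (fun d => p d && r d) := by
  induction l with
  | nil => simp
  | cons d l ih =>
    have hle : (l.filter (fun d => p d && !r d)).length ≤ (l.filter p).length := by
      have : l.filter (fun d => p d && !r d) = (l.filter p).filter (fun d => !r d) := by
        rw [List.filter_filter]
        apply List.filter_congr
        intro a _
        cases p a <;> cases r a <;> rfl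
      rw [this]
      exact List.length_filter_le _ _
    cases hp : p d <;> cases hr : r d <;>
      simp [List.filter_cons, List.any_cons, hp, hr, ← ih] <;> omega

theorem pv_core (depts : List (Option String)) :
    (if (depts.filter pvTruthy).length ≠
        (depts.filter (fun d =>
          match d with
          | none => false
          | some s => decide (s ≠ "") && !(PySem.Str.isIn "do not use" (PySem.Str.lower s)))).length
      then true else false)
      = depts.any (fun d =>
          match d with
          | none => false
          | some s => decide (s ≠ "") && PySem.Str.isIn "do not use" (PySem.Str.lower s)) := by
  have h := pv_filter_len_ne_iff_any pvTruthy
      (fun d => match d with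
        | none => false
        | some s => PySem.Str.isIn "do not use" (PySem.Str.lower s)) depts
  have hfe : depts.filter (fun d =>
      match d with
      | none => false
      | some s => decide (s ≠ "") && !(PySem.Str.isIn "do not use" (PySem.Str.lower s)))
      = depts.filter (fun d => pvTruthy d &&
        !(match d with
          | none => false
          | some s => PySem.Str.isIn "do not use" (PySem.Str.lower s))) := by
    apply List.filter_congr
    intro a _
    cases a <;> simp [pvTruthy]
  have hae : depts.any (fun d =>
      match d with
      | none => false
      | some s => decide (s ≠ "") && PySem.Str.isIn "do not use" (PySem.Str.lower s))
      = depts.any (fun d => pvTruthy d &&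
        (match d with
          | none => false
          | some s => PySem.Str.isIn "do not use" (PySem.Str.lower s))) := by
    have hfun : (fun d : Option String =>
        match d with
        | none => false
        | some s => decide (s ≠ "") && PySem.Str.isIn "do not use" (PySem.Str.lower s))
        = (fun d : Option String => pvTruthy d &&
          (match d with
            | none => false
            | some s => PySem.Str.isIn "do not use" (PySem.Str.lower s))) := by
      funext a
      cases a <;> simp [pvTruthy]
    rw [hfun]
  rw [hfe, hae, ← h]
  split <;> simp_all

theorem is_only_do_not_use_body (parsed_user : List (String × List (Option String))) :
    is_only_do_not_use parsed_user = is_only_do_not_use_alt parsed_user :=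
  pv_core ((PySem.Dict.get? (PySem.Dict.mk parsed_user) "current_depts").getD [])

-- ===== VERDICT (by name: the statement is the Claim_ definition above) =====
theorem is_only_do_not_use_spec : Claim_equal_is_only_do_not_use := by
  intro parsed_user _ _
  unfold Spec_is_only_do_not_use
  exact is_only_do_not_use_body parsed_user
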